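-- pv_equiv track=rewrite | github.com/chunjaemin/backjoon_solve | kakao_2024_gift_new.py | solution
-- ===== SOURCE A (Python) =====
-- def solution(friends, gifts):
--     N = len(friends)
--     mapt = {v : i for i, v in enumerate(friends)}
--
--     cgifts =[[0]* N for _ in range(N)]
--     gift_index = [0]*N
--
--     for x in gifts:
--         sender, receiver = x.split()
--         cgifts[mapt[sender]][mapt[receiver]] += 1
--
--     for i in range(N):
--         gift_index[i] = sum(cgifts[i][x] for x in range(N)) - sum(cgifts[x][i] for x in range(N))
--
--     nget_gifts = [0]*N
--     for i in range(N):
--         for j in range(N):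
--             if cgifts[i][j] > cgifts[j][i]:
--                 nget_gifts[i] += 1
--             if cgifts[i][j] == cgifts[j][i]:
--                 if gift_index[i] > gift_index[j]:
--                     nget_gifts[i] += 1
--
--     return max(nget_gifts)
-- ===== SOURCE B (Python) =====
-- def solution(friends, gifts):
--     n = len(friends)
--     idx = {v: i for i, v in enumerate(friends)}
--     bal = [0] * n
--     pc = {}
--     for g in gifts:
--         s, r = g.split()
--         si, ri = idx[s], idx[r]
--         bal[si] += 1
--         bal[ri] -= 1
--         if si <= ri:
--             a, b = pc.get((si, ri), (0, 0))
--             pc[(si, ri)] = (a + 1, b)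
--         else:
--             a, b = pc.get((ri, si), (0, 0))
--             pc[(ri, si)] = (a, b + 1)
--     # default score: for each friend, points from silent pairs = rank of its balance,
--     # via one sort (first index of a value in the sorted list = #smaller values)
--     sb = sorted(bal)
--     less = {}
--     for k, v in enumerate(sb):
--         if v not in less:
--             less[v] = k
--     score = [less[v] for v in bal]
--     # correct only the pairs that actually exchanged gifts, and only when counts differ
--     for (i, j), (a, b) in pc.items():
--         if i == j or a == b:
--             continue
--         w, l = (i, j) if a > b else (j, i)
--         if bal[w] <= bal[l]:
--             score[w] += 1
--         if bal[l] > bal[w]: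
--             score[l] -= 1
--     return max(score)
-- ===== Notes on version B (the rewrite author's own statement) =====
-- stated objective: alternative
-- what changed: B never scans all N^2 pairs: it sorts the balance vector once and gives every friend its balance-rank (the score all silent pairs produce), then corrects only the pairs that actually appear in gifts (a dict of unordered pairs with directed counts), whereas A builds a dense N*N matrix, derives balances from row/column sums and scores with a full double loop.
import Mathlib
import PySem

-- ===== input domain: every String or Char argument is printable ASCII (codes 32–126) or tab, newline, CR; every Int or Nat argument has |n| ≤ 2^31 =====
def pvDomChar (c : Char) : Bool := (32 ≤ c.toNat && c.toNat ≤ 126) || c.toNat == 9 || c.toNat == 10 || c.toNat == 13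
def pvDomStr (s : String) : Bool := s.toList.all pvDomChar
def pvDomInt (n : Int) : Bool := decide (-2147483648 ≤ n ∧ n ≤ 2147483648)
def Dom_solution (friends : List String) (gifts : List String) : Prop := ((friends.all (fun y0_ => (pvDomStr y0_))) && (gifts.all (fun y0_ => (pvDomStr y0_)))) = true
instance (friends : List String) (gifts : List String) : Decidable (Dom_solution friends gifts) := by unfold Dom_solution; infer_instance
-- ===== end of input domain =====

-- B avoids A's dense N×N matrix and full pairwise scoring loop: it sorts the balance vector
-- once and scores every friend with its balance rank (what all silent pairs contribute),
-- then corrects only the pairs actually present in gifts, kept in a dict of unordered pairs.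

-- shared parsing helpers: both Pythons build {v: i for i, v in enumerate(friends)}
-- and do `s, r = g.split(); idx[s], idx[r]` identically
def pvIdx (friends : List String) : PySem.Dict String Int :=
  (PySem.List.enumerate friends).foldl (fun d p => d.insert p.2 p.1) PySem.Dict.empty

def pvKey? (idx : PySem.Dict String Int) (g : String) : Option (Int × Int) :=
  match PySem.Str.split₀ g with
  | [s, r] =>
    match idx.get? s, idx.get? r with
    | some i, some j => some (i, j)
    | _, _ => none
  | _ => none

-- ===== PORT A =====
def solution (friends : List String) (gifts : List String) : Int :=
  let N : Int := friends.length
  let mapt := pvIdx friends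
  let cgifts0 : List (List Int) := List.replicate friends.length (List.replicate friends.length 0)
  let cgifts := gifts.foldl (fun mat x =>
    match pvKey? mapt x with
    | some (i, j) =>
        PySem.List.pySetD mat i
          (PySem.List.pySetD (PySem.List.pyGetD mat i []) j
            (PySem.List.pyGetD (PySem.List.pyGetD mat i []) j 0 + 1))
    | none => mat) cgifts0
  let giftIndex := (PySem.List.pyRange 0 N 1).map (fun i =>
    ((PySem.List.pyRange 0 N 1).map (fun x => PySem.List.pyGetD (PySem.List.pyGetD cgifts i []) x 0)).sum
    - ((PySem.List.pyRange 0 N 1).map (fun x => PySem.List.pyGetD (PySem.List.pyGetD cgifts x []) i 0)).sum)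
  let nget := (PySem.List.pyRange 0 N 1).map (fun i =>
    (PySem.List.pyRange 0 N 1).foldl (fun acc j =>
      let acc := if PySem.List.pyGetD (PySem.List.pyGetD cgifts i []) j 0 > PySem.List.pyGetD (PySem.List.pyGetD cgifts j []) i 0 then acc + 1 else acc
      if PySem.List.pyGetD (PySem.List.pyGetD cgifts i []) j 0 = PySem.List.pyGetD (PySem.List.pyGetD cgifts j []) i 0 then
        (if PySem.List.pyGetD giftIndex i 0 > PySem.List.pyGetD giftIndex j 0 then acc + 1 else acc)
      else acc) (0 : Int))
  (PySem.List.max? nget (fun y => y)).getD 0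

-- ===== PORT B =====
def solution_alt (friends : List String) (gifts : List String) : Int :=
  let idx := pvIdx friends
  let st := gifts.foldl (fun (st : List Int × PySem.Dict (Int × Int) (Int × Int)) g =>
    match pvKey? idx g with
    | some (si, ri) =>
        let bal := PySem.List.pySetD st.1 si (PySem.List.pyGetD st.1 si 0 + 1)
        let bal := PySem.List.pySetD bal ri (PySem.List.pyGetD bal ri 0 - 1)
        if si ≤ ri then
          let ab := st.2.getD (si, ri) (0, 0)
          (bal, st.2.insert (si, ri) (ab.1 + 1, ab.2))
        else
          let ab := st.2.getD (ri, si) (0, 0)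
          (bal, st.2.insert (ri, si) (ab.1, ab.2 + 1))
    | none => st) (List.replicate friends.length (0 : Int), PySem.Dict.empty)
  let bal := st.1
  let pc := st.2
  let sb := PySem.List.sorted bal (fun x => x) false
  let less := (PySem.List.enumerate sb).foldl (fun d p =>
    if d.contains p.2 then d else d.insert p.2 p.1) PySem.Dict.empty
  let score0 := bal.map (fun v => less.getD v 0)
  let score := pc.items.foldl (fun sc t =>
    if t.1.1 = t.1.2 ∨ t.2.1 = t.2.2 then sc
    else
      let w := if t.2.1 > t.2.2 then t.1.1 else t.1.2
      let l := if t.2.1 > t.2.2 then t.1.2 else t.1.1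
      let sc := if PySem.List.pyGetD bal w 0 ≤ PySem.List.pyGetD bal l 0
                then PySem.List.pySetD sc w (PySem.List.pyGetD sc w 0 + 1) else sc
      if PySem.List.pyGetD bal l 0 > PySem.List.pyGetD bal w 0
      then PySem.List.pySetD sc l (PySem.List.pyGetD sc l 0 - 1) else sc) score0
  (PySem.List.max? score (fun y => y)).getD 0

-- ===== PRECONDITION & SPEC =====
-- Pre_ excludes exactly the inputs where the Python A raises: empty friends (max([]) is a
-- ValueError), a gift line that does not split into exactly two words (ValueError), or a
-- word that is not a friend's name (KeyError). B raises there too.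
def Pre_solution (friends : List String) (gifts : List String) : Prop :=
  friends ≠ [] ∧ ∀ g ∈ gifts,
    (PySem.Str.split₀ g).length = 2 ∧ ∀ t ∈ PySem.Str.split₀ g, t ∈ friends
instance (friends : List String) (gifts : List String) : Decidable (Pre_solution friends gifts) := by
  unfold Pre_solution; infer_instance

def pvWitness_solution : List String × List String := (["muzi", "ryan", "frodo"], ["muzi ryan", "ryan frodo", "muzi frodo", "ryan muzi"])

def Spec_solution (friends : List String) (gifts : List String) (out : Int) : Prop := out = solution_alt friends gifts
instance (friends : List String) (gifts : List String) (out : Int) : Decidable (Spec_solution friends gifts out) := by unfold Spec_solution; infer_instance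

-- ===== CLAIM (what is proved, stated in full; the proofs are below) =====
def Claim_equal_solution : Prop := ∀ (friends : List String) (gifts : List String), Dom_solution friends gifts → Pre_solution friends gifts → Spec_solution friends gifts (solution friends gifts)

-- ===== LEMMAS AND PROOFS =====

theorem pvGetD_set (l : List Int) (i j : Nat) (v : Int) :
    (l.set i v).getD j 0 = if i = j ∧ i < l.length then v else l.getD j 0 := by
  simp only [List.getD_eq_getElem?_getD, List.getElem?_set]
  split
  · rename_i h; subst h; split <;> simp_all
  · simp_all

theorem pvGetD_set' {α : Type} (d : α) (l : List α) (i j : Nat) (v : α) :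
    (l.set i v).getD j d = if i = j ∧ i < l.length then v else l.getD j d := by
  simp only [List.getD_eq_getElem?_getD, List.getElem?_set]
  split
  · rename_i h; subst h; split <;> simp_all
  · simp_all

theorem pvRange'_split (n k : Nat) (hk : k < n) :
    List.range' 0 n = List.range' 0 k ++ k :: List.range' (k+1) (n-k-1) := by
  have h1 : n = k + (n - k) := by omega
  have h2 : List.range' 0 k ++ List.range' (0 + k) (n - k) = List.range' 0 (k + (n - k)) :=
    List.range'_append_1
  rw [h1, ← h2]
  have h3 : n - k = (n - k - 1) + 1 := by omega
  rw [h3, List.range'_succ]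
  simp

theorem pvSum_ind' (len : Nat) : ∀ (s k : Nat) (c : Int),
    ((List.range' s len).map (fun x => if x = k then c else 0)).sum
      = if s ≤ k ∧ k < s + len then c else 0 := by
  induction len with
  | zero => intro s k c; rw [if_neg (by omega)]; simp
  | succ len ih =>
    intro s k c
    rw [List.range'_succ, List.map_cons, List.sum_cons, ih (s+1) k c]
    split_ifs <;> omega

theorem pvSum_ind (n k : Nat) (c : Int) (hk : k < n) :
    ((List.range' 0 n).map (fun x => if x = k then c else 0)).sum = c := by
  rw [pvSum_ind' n 0 k c]; simp [hk]

theorem pvSum_update (n k : Nat) (c : Int) (f g : Nat → Int) (hk : k < n)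
    (h : ∀ x, g x = f x + if x = k then c else 0) :
    ((List.range' 0 n).map g).sum = ((List.range' 0 n).map f).sum + c := by
  calc ((List.range' 0 n).map g).sum
      = ((List.range' 0 n).map (fun x => f x + if x = k then c else 0)).sum := by
        rw [List.map_congr_left (fun x _ => h x)]
    _ = ((List.range' 0 n).map f).sum + ((List.range' 0 n).map (fun x => if x = k then c else 0)).sum := by
        simp [List.sum_map_add]
    _ = _ := by rw [pvSum_ind n k c hk]

theorem pvFold_insert_get? (l : List (Int × String)) (d : PySem.Dict String Int) (s : String) (v : Int)
    (h : (l.foldl (fun d p => d.insert p.2 p.1) d).get? s = some v) :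
    d.get? s = some v ∨ ∃ p ∈ l, v = p.1 := by
  induction l generalizing d with
  | nil => exact Or.inl h
  | cons p t ih =>
    simp only [List.foldl_cons] at h
    rcases ih _ h with h' | ⟨q, hq, hv⟩
    · by_cases hs : s = p.2
      · subst hs
        rw [PySem.Dict.get?_insert_self] at h'
        exact Or.inr ⟨p, List.mem_cons_self, by injection h' with h''; omega⟩
      · rw [PySem.Dict.get?_insert_of_ne _ _ hs] at h'
        exact Or.inl h'
    · exact Or.inr ⟨q, List.mem_cons_of_mem _ hq, hv⟩

theorem pvIdx_get?_lt (friends : List String) (s : String) (v : Int)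
    (h : (pvIdx friends).get? s = some v) : ∃ k : Nat, v = (k : Int) ∧ k < friends.length := by
  rcases pvFold_insert_get? _ _ _ _ h with h' | ⟨p, hp, hv⟩
  · rw [PySem.Dict.get?_empty] at h'; exact absurd h' (by simp)
  · rcases (PySem.List.mem_enumerate_iff _ _ _).1 hp with ⟨k, hk, rfl⟩
    exact ⟨k, by simpa using hv, hk⟩

theorem pvKey?_bounds (friends : List String) (g : String) (p q : Int)
    (h : pvKey? (pvIdx friends) g = some (p, q)) :
    ∃ a b : Nat, p = (a : Int) ∧ q = (b : Int) ∧ a < friends.length ∧ b < friends.length := by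
  unfold pvKey? at h
  split at h
  · split at h
    · rename_i i j hi hj
      rcases pvIdx_get?_lt _ _ _ hi with ⟨a, rfl, ha⟩
      rcases pvIdx_get?_lt _ _ _ hj with ⟨b, rfl, hb⟩
      injection h with h'
      exact ⟨a, b, (congrArg Prod.fst h').symm, (congrArg Prod.snd h').symm, ha, hb⟩
    · exact absurd h (by simp)
  · exact absurd h (by simp)

def pvRowS (n : Nat) (mat : List (List Int)) (i : Nat) : Int :=
  ((List.range' 0 n).map (fun x => (mat.getD i []).getD x 0)).sum
def pvColS (n : Nat) (mat : List (List Int)) (i : Nat) : Int :=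
  ((List.range' 0 n).map (fun x => (mat.getD x []).getD i 0)).sum

-- invariant of the gifts pass: A's matrix vs B's (bal, pair-dict) state
def pvInv (n : Nat) (mat : List (List Int)) (pc : PySem.Dict (Int × Int) (Int × Int)) (bal : List Int) : Prop :=
  mat.length = n ∧ (∀ i, i < n → (mat.getD i []).length = n) ∧
  (∀ i j : Nat, i < j → j < n →
    pc.getD ((i : Int), (j : Int)) (0, 0) = ((mat.getD i []).getD j 0, (mat.getD j []).getD i 0)) ∧
  pc.keys.Nodup ∧
  (∀ p ∈ pc.keys, ∃ i j : Nat, p = ((i : Int), (j : Int)) ∧ i ≤ j ∧ j < n) ∧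
  bal.length = n ∧
  (∀ i : Nat, i < n → bal.getD i 0 = pvRowS n mat i - pvColS n mat i)

theorem pvRowS_set (n a b : Nat) (mat : List (List Int)) (i : Nat)
    (hlen : mat.length = n) (hrow : ∀ i, i < n → (mat.getD i []).length = n)
    (ha : a < n) (hb : b < n) (hi : i < n) :
    pvRowS n (mat.set a ((mat.getD a []).set b ((mat.getD a []).getD b 0 + 1))) i
      = pvRowS n mat i + (if i = a then 1 else 0) := by
  unfold pvRowS
  rw [pvGetD_set' [] mat a i _]
  by_cases hia : i = a
  · subst hia
    rw [if_pos ⟨rfl, by omega⟩, if_pos rfl]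
    exact pvSum_update n b 1 _ _ hb (by
      intro x
      rw [pvGetD_set]
      by_cases hxb : x = b
      · subst hxb; rw [if_pos ⟨rfl, by rw [hrow i hi]; omega⟩, if_pos rfl]
      · rw [if_neg (by tauto), if_neg (by omega)]; ring)
  · rw [if_neg (by tauto), if_neg (by omega)]; ring

theorem pvColS_set (n a b : Nat) (mat : List (List Int)) (i : Nat)
    (hlen : mat.length = n) (hrow : ∀ i, i < n → (mat.getD i []).length = n)
    (ha : a < n) (hb : b < n) (_hi : i < n) :
    pvColS n (mat.set a ((mat.getD a []).set b ((mat.getD a []).getD b 0 + 1))) i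
      = pvColS n mat i + (if i = b then 1 else 0) := by
  unfold pvColS
  by_cases hib : i = b
  · subst hib
    rw [if_pos rfl]
    exact pvSum_update n a 1 _ _ ha (by
      intro x
      rw [pvGetD_set' [] mat a x _]
      by_cases hxa : x = a
      · subst hxa
        rw [if_pos ⟨rfl, by omega⟩, pvGetD_set, if_pos ⟨rfl, by rw [hrow x ha]; omega⟩, if_pos rfl]
      · rw [if_neg (by tauto), if_neg (by omega)]; ring)
  · rw [if_neg (by omega), add_zero]
    apply congrArg
    apply List.map_congr_left
    intro x _
    rw [pvGetD_set' [] mat a x _]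
    by_cases hxa : x = a
    · subst hxa
      rw [if_pos ⟨rfl, by omega⟩, pvGetD_set, if_neg (by tauto)]
    · rw [if_neg (by tauto)]

theorem pvMatGetD_set (mat : List (List Int)) (a b i j : Nat)
    (ha : a < mat.length) (hb : b < (mat.getD a []).length) :
    ((mat.set a ((mat.getD a []).set b ((mat.getD a []).getD b 0 + 1))).getD i []).getD j 0
      = (mat.getD i []).getD j 0 + (if i = a ∧ j = b then 1 else 0) := by
  rw [pvGetD_set' [] mat a i _]
  by_cases hia : a = i
  · subst hia
    rw [if_pos ⟨rfl, ha⟩, pvGetD_set]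
    by_cases hjb : b = j
    · subst hjb; rw [if_pos ⟨rfl, hb⟩, if_pos ⟨rfl, rfl⟩]
    · rw [if_neg (by tauto), if_neg (by tauto)]; ring
  · rw [if_neg (by tauto), if_neg (by omega)]; ring

theorem pvInv_step (friends : List String) (g : String) (mat : List (List Int))
    (pc : PySem.Dict (Int × Int) (Int × Int)) (bal : List Int)
    (h : pvInv friends.length mat pc bal) :
    pvInv friends.length
      (match pvKey? (pvIdx friends) g with
       | some (i, j) => PySem.List.pySetD mat i
           (PySem.List.pySetD (PySem.List.pyGetD mat i []) j
             (PySem.List.pyGetD (PySem.List.pyGetD mat i []) j 0 + 1))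
       | none => mat)
      (match pvKey? (pvIdx friends) g with
       | some (si, ri) =>
           if si ≤ ri then pc.insert (si, ri) ((pc.getD (si, ri) (0, 0)).1 + 1, (pc.getD (si, ri) (0, 0)).2)
           else pc.insert (ri, si) ((pc.getD (ri, si) (0, 0)).1, (pc.getD (ri, si) (0, 0)).2 + 1)
       | none => pc)
      (match pvKey? (pvIdx friends) g with
       | some (si, ri) =>
           PySem.List.pySetD (PySem.List.pySetD bal si (PySem.List.pyGetD bal si 0 + 1)) ri
             (PySem.List.pyGetD (PySem.List.pySetD bal si (PySem.List.pyGetD bal si 0 + 1)) ri 0 - 1)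
       | none => bal) := by
  set n := friends.length with hn
  obtain ⟨h1, h2, h3, h6, h7, h4, h5⟩ := h
  cases hk : pvKey? (pvIdx friends) g with
  | none => exact ⟨h1, h2, h3, h6, h7, h4, h5⟩
  | some pq =>
    obtain ⟨p, q⟩ := pq
    rcases pvKey?_bounds friends g p q hk with ⟨a, b, rfl, rfl, ha, hb⟩
    simp only [PySem.List.pySetD_natCast, PySem.List.pyGetD_natCast]
    have hA : a < mat.length := by omega
    have hB : b < (mat.getD a []).length := by rw [h2 a ha]; omega
    refine ⟨by simpa using h1, ?_, ?_, ?_, ?_, ?_, ?_⟩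
    · intro i hi
      rw [pvGetD_set' [] mat a i _]
      by_cases hia : a = i
      · subst hia; rw [if_pos ⟨rfl, by omega⟩, List.length_set]; exact h2 a ha
      · rw [if_neg (by tauto)]; exact h2 i hi
    · intro i j hij hj
      by_cases hab : a ≤ b
      · rw [if_pos (by exact_mod_cast hab), PySem.Dict.getD_insert]
        by_cases hia : a = i ∧ b = j
        · obtain ⟨rfl, rfl⟩ := hia
          rw [if_pos rfl, h3 a b hij hj,
              pvMatGetD_set mat a b a b hA hB, pvMatGetD_set mat a b b a hA hB,
              if_pos ⟨rfl, rfl⟩, if_neg (by omega)]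
          simp
        · rw [if_neg (by simp [Prod.ext_iff]; omega), h3 i j hij hj,
              pvMatGetD_set mat a b i j hA hB, pvMatGetD_set mat a b j i hA hB,
              if_neg (by tauto), if_neg (by intro hE; obtain ⟨e1, e2⟩ := hE; omega)]
          simp
      · rw [if_neg (by simpa using hab), PySem.Dict.getD_insert]
        by_cases hib : b = i ∧ a = j
        · obtain ⟨rfl, rfl⟩ := hib
          rw [if_pos rfl, h3 b a hij hj,
              pvMatGetD_set mat a b b a hA hB, pvMatGetD_set mat a b a b hA hB,
              if_neg (by intro hE; obtain ⟨e1, e2⟩ := hE; omega), if_pos ⟨rfl, rfl⟩]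
          simp
        · rw [if_neg (by simp [Prod.ext_iff]; omega), h3 i j hij hj,
              pvMatGetD_set mat a b i j hA hB, pvMatGetD_set mat a b j i hA hB,
              if_neg (by intro hE; obtain ⟨e1, e2⟩ := hE; omega), if_neg (by tauto)]
          simp
    · split_ifs <;> exact PySem.Dict.nodup_keys_insert _ _ _ h6
    · intro p hp
      by_cases hab : a ≤ b
      · rw [if_pos (by exact_mod_cast hab)] at hp
        rcases (PySem.Dict.mem_keys_insert _ _ _ _).1 hp with rfl | hp'
        · exact ⟨a, b, rfl, hab, hb⟩
        · exact h7 p hp'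
      · rw [if_neg (by simpa using hab)] at hp
        rcases (PySem.Dict.mem_keys_insert _ _ _ _).1 hp with rfl | hp'
        · exact ⟨b, a, rfl, by omega, ha⟩
        · exact h7 p hp'
    · simpa using h4
    · intro i hi
      rw [pvRowS_set n a b mat i h1 h2 ha hb hi, pvColS_set n a b mat i h1 h2 ha hb hi]
      rw [pvGetD_set]
      have hlen1 : (bal.set a (bal.getD a 0 + 1)).length = n := by simpa using h4
      by_cases hbi : b = i
      · subst hbi
        rw [if_pos ⟨rfl, by omega⟩, pvGetD_set]
        by_cases hab : a = b
        · subst hab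
          rw [if_pos ⟨rfl, by omega⟩, h5 a ha]
          simp
        · rw [if_neg (by tauto), h5 b hb]
          simp [if_neg (by omega : ¬ b = a)]
          ring
      · rw [if_neg (by tauto), pvGetD_set]
        by_cases hai : a = i
        · subst hai
          rw [if_pos ⟨rfl, by omega⟩, h5 a ha]
          simp [if_neg (by omega : ¬ a = b)]
          ring
        · rw [if_neg (by tauto), h5 i hi]
          rw [if_neg (by omega : ¬ i = a), if_neg (by omega : ¬ i = b)]
          ring


theorem pvInv_init (n : Nat) :
    pvInv n (List.replicate n (List.replicate n (0:Int))) PySem.Dict.empty (List.replicate n (0:Int)) := by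
  have hg : ∀ i : Nat, i < n → (List.replicate n (List.replicate n (0:Int))).getD i [] = List.replicate n (0:Int) := by
    intro i hi
    rw [List.getD_eq_getElem _ _ (by simpa using hi), List.getElem_replicate]
  have hz : ∀ i : Nat, i < n → (List.replicate n (0:Int)).getD i 0 = 0 := by
    intro i hi
    rw [List.getD_eq_getElem _ _ (by simpa using hi), List.getElem_replicate]
  refine ⟨by simp, ?_, ?_, by simp [PySem.Dict.keys_empty], ?_, by simp, ?_⟩
  · intro i hi; rw [hg i hi]; simp
  · intro i j hij hj
    rw [hg i (by omega), hg j hj, hz i (by omega), hz j hj, PySem.Dict.getD_empty]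
  · intro p hp; rw [PySem.Dict.keys_empty] at hp; exact absurd hp (by simp)
  · intro i hi
    rw [hz i hi]
    unfold pvRowS pvColS
    have e1 : ∀ (f : Nat → Int), (∀ x ∈ List.range' 0 n, f x = 0) → ((List.range' 0 n).map f).sum = 0 := by
      intro f hf; rw [List.map_congr_left hf]; simp
    rw [e1 _ (fun x hx => by
          rw [hg i hi, hz x (by have := List.mem_range'_1.1 hx; omega)]),
        e1 _ (fun x hx => by
          rw [hg x (by have := List.mem_range'_1.1 hx; omega), hz i hi])]
    ring

theorem pvInv_fold (friends gifts : List String) (mat : List (List Int))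
    (pc : PySem.Dict (Int × Int) (Int × Int)) (bal : List Int)
    (h : pvInv friends.length mat pc bal) :
    pvInv friends.length
      (gifts.foldl (fun mat x =>
        match pvKey? (pvIdx friends) x with
        | some (i, j) => PySem.List.pySetD mat i
            (PySem.List.pySetD (PySem.List.pyGetD mat i []) j
              (PySem.List.pyGetD (PySem.List.pyGetD mat i []) j 0 + 1))
        | none => mat) mat)
      (gifts.foldl (fun (st : List Int × PySem.Dict (Int × Int) (Int × Int)) g =>
        match pvKey? (pvIdx friends) g with
        | some (si, ri) =>
            let bal := PySem.List.pySetD st.1 si (PySem.List.pyGetD st.1 si 0 + 1)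
            let bal := PySem.List.pySetD bal ri (PySem.List.pyGetD bal ri 0 - 1)
            if si ≤ ri then
              let ab := st.2.getD (si, ri) (0, 0)
              (bal, st.2.insert (si, ri) (ab.1 + 1, ab.2))
            else
              let ab := st.2.getD (ri, si) (0, 0)
              (bal, st.2.insert (ri, si) (ab.1, ab.2 + 1))
        | none => st) (bal, pc)).2
      (gifts.foldl (fun (st : List Int × PySem.Dict (Int × Int) (Int × Int)) g =>
        match pvKey? (pvIdx friends) g with
        | some (si, ri) =>
            let bal := PySem.List.pySetD st.1 si (PySem.List.pyGetD st.1 si 0 + 1)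
            let bal := PySem.List.pySetD bal ri (PySem.List.pyGetD bal ri 0 - 1)
            if si ≤ ri then
              let ab := st.2.getD (si, ri) (0, 0)
              (bal, st.2.insert (si, ri) (ab.1 + 1, ab.2))
            else
              let ab := st.2.getD (ri, si) (0, 0)
              (bal, st.2.insert (ri, si) (ab.1, ab.2 + 1))
        | none => st) (bal, pc)).1 := by
  induction gifts generalizing mat pc bal with
  | nil => exact h
  | cons g t ih =>
    simp only [List.foldl_cons]
    have hstep := pvInv_step friends g mat pc bal h
    cases hk : pvKey? (pvIdx friends) g with
    | none =>
      simp only [hk] at hstep ⊢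
      exact ih mat pc bal h
    | some pq =>
      obtain ⟨p, q⟩ := pq
      simp only [hk] at hstep ⊢
      have hsplit : (let bal' := PySem.List.pySetD bal p (PySem.List.pyGetD bal p 0 + 1)
            let bal'' := PySem.List.pySetD bal' q (PySem.List.pyGetD bal' q 0 - 1)
            if p ≤ q then
              let ab := pc.getD (p, q) (0, 0)
              (bal'', pc.insert (p, q) (ab.1 + 1, ab.2))
            else
              let ab := pc.getD (q, p) (0, 0)
              (bal'', pc.insert (q, p) (ab.1, ab.2 + 1)))
          = (PySem.List.pySetD (PySem.List.pySetD bal p (PySem.List.pyGetD bal p 0 + 1)) q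
               (PySem.List.pyGetD (PySem.List.pySetD bal p (PySem.List.pyGetD bal p 0 + 1)) q 0 - 1),
             if p ≤ q then pc.insert (p, q) ((pc.getD (p, q) (0, 0)).1 + 1, (pc.getD (p, q) (0, 0)).2)
             else pc.insert (q, p) ((pc.getD (q, p) (0, 0)).1, (pc.getD (q, p) (0, 0)).2 + 1)) := by
        split_ifs <;> rfl
      rw [hsplit]
      exact ih _ _ _ hstep

-- scoring: A awards a point for every won or tied-with-larger-balance opponent
def pvPt (M : List (List Int)) (bal : List Int) (i j : Nat) : Int :=
  (if (M.getD i []).getD j 0 > (M.getD j []).getD i 0 then 1 else 0) +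
  (if (M.getD i []).getD j 0 = (M.getD j []).getD i 0 ∧ bal.getD i 0 > bal.getD j 0 then 1 else 0)

def pvDflt (bal : List Int) (m j : Nat) : Int := if bal.getD m 0 > bal.getD j 0 then 1 else 0

def pvDiff (M : List (List Int)) (bal : List Int) (m j : Nat) : Int :=
  pvPt M bal m j - pvDflt bal m j

def pvFi (M : List (List Int)) (bal : List Int) (m : Nat) (k : Int × Int) : Int :=
  if k.1 = k.2 then 0
  else if (m : Int) = k.1 then pvDiff M bal m k.2.toNat
  else if (m : Int) = k.2 then pvDiff M bal m k.1.toNat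
  else 0

def pvDelta (bal : List Int) (t : (Int × Int) × (Int × Int)) (m : Nat) : Int :=
  if t.1.1 = t.1.2 ∨ t.2.1 = t.2.2 then 0 else
  (if (m : Int) = (if t.2.1 > t.2.2 then t.1.1 else t.1.2) ∧
      PySem.List.pyGetD bal (if t.2.1 > t.2.2 then t.1.1 else t.1.2) 0 ≤
      PySem.List.pyGetD bal (if t.2.1 > t.2.2 then t.1.2 else t.1.1) 0 then 1 else 0)
  + (if (m : Int) = (if t.2.1 > t.2.2 then t.1.2 else t.1.1) ∧
       PySem.List.pyGetD bal (if t.2.1 > t.2.2 then t.1.2 else t.1.1) 0 >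
       PySem.List.pyGetD bal (if t.2.1 > t.2.2 then t.1.1 else t.1.2) 0 then -1 else 0)

theorem pvStep2 (sc : List Int) (i j m : Nat) (c1 c2 : Prop) [Decidable c1] [Decidable c2]
    (_hij : i ≠ j) (hi : i < sc.length) (hj : j < sc.length) (hm : m < sc.length) :
    (if c2 then (if c1 then sc.set i (sc.getD i 0 + 1) else sc).set j
              ((if c1 then sc.set i (sc.getD i 0 + 1) else sc).getD j 0 - 1)
     else (if c1 then sc.set i (sc.getD i 0 + 1) else sc)).getD m 0
      = sc.getD m 0 + ((if m = i ∧ c1 then 1 else 0) + (if m = j ∧ c2 then -1 else 0)) := by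
  have e3 : (if c1 then sc.set i (sc.getD i 0 + 1) else sc).length = sc.length := by
    split_ifs <;> simp
  have e2 : ∀ m', (if c1 then sc.set i (sc.getD i 0 + 1) else sc).getD m' 0
      = sc.getD m' 0 + (if m' = i ∧ c1 then 1 else 0) := by
    intro m'
    by_cases h1 : c1
    · rw [if_pos h1, pvGetD_set]
      by_cases hmi : i = m'
      · subst hmi
        rw [if_pos (show i = i ∧ i < sc.length from ⟨rfl, hi⟩),
            if_pos (show i = i ∧ c1 from ⟨rfl, h1⟩)]
      · rw [if_neg (show ¬(i = m' ∧ i < sc.length) by tauto),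
            if_neg (show ¬(m' = i ∧ c1) by rintro ⟨h, -⟩; exact hmi h.symm)]
        ring
    · rw [if_neg h1, if_neg (show ¬(m' = i ∧ c1) by tauto)]
      ring
  by_cases h2 : c2
  · rw [if_pos h2, pvGetD_set, e3, e2 j, e2 m]
    by_cases hmj : j = m
    · subst hmj
      rw [if_pos (show j = j ∧ j < sc.length from ⟨rfl, hj⟩),
          if_pos (show j = j ∧ c2 from ⟨rfl, h2⟩)]
      ring
    · rw [if_neg (show ¬(j = m ∧ j < sc.length) by tauto),
          if_neg (show ¬(m = j ∧ c2) by rintro ⟨h, -⟩; exact hmj h.symm)]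
      ring
  · rw [if_neg h2, e2 m, if_neg (show ¬(m = j ∧ c2) by rintro ⟨-, hc⟩; exact h2 hc)]
    ring

theorem pvStep_one (bal : List Int) (n : Nat) (sc : List Int) (hsc : sc.length = n)
    (t : (Int × Int) × (Int × Int)) (i j : Nat)
    (ht1 : t.1 = ((i : Int), (j : Int))) (hij : i ≤ j) (hj : j < n) :
    ((fun sc (t : (Int × Int) × (Int × Int)) =>
        if t.1.1 = t.1.2 ∨ t.2.1 = t.2.2 then sc
        else
          let w := if t.2.1 > t.2.2 then t.1.1 else t.1.2
          let l := if t.2.1 > t.2.2 then t.1.2 else t.1.1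
          let sc := if PySem.List.pyGetD bal w 0 ≤ PySem.List.pyGetD bal l 0
                    then PySem.List.pySetD sc w (PySem.List.pyGetD sc w 0 + 1) else sc
          if PySem.List.pyGetD bal l 0 > PySem.List.pyGetD bal w 0
          then PySem.List.pySetD sc l (PySem.List.pyGetD sc l 0 - 1) else sc) sc t).length = n
    ∧ ∀ m, m < n → ((fun sc (t : (Int × Int) × (Int × Int)) =>
        if t.1.1 = t.1.2 ∨ t.2.1 = t.2.2 then sc
        else
          let w := if t.2.1 > t.2.2 then t.1.1 else t.1.2
          let l := if t.2.1 > t.2.2 then t.1.2 else t.1.1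
          let sc := if PySem.List.pyGetD bal w 0 ≤ PySem.List.pyGetD bal l 0
                    then PySem.List.pySetD sc w (PySem.List.pyGetD sc w 0 + 1) else sc
          if PySem.List.pyGetD bal l 0 > PySem.List.pyGetD bal w 0
          then PySem.List.pySetD sc l (PySem.List.pyGetD sc l 0 - 1) else sc) sc t).getD m 0
        = sc.getD m 0 + pvDelta bal t m := by
  obtain ⟨⟨k1, k2⟩, a, b⟩ := t
  simp only [Prod.mk.injEq] at ht1
  obtain ⟨rfl, rfl⟩ := ht1
  simp only [pvDelta]
  by_cases hg : ((i : Int) = (j : Int) ∨ a = b)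
  · simp only [if_pos hg]
    exact ⟨hsc, fun m _ => by ring⟩
  · have hij' : i ≠ j := by
      intro h; exact hg (Or.inl (by exact_mod_cast h))
    simp only [if_neg hg]
    by_cases hord : a > b
    · simp only [if_pos hord, PySem.List.pySetD_natCast, PySem.List.pyGetD_natCast]
      constructor
      · split_ifs <;> simp [hsc]
      · intro m hm
        rw [pvStep2 sc i j m _ _ hij' (by omega) (by omega) (by omega)]
        simp only [Nat.cast_inj]
    · simp only [if_neg hord, PySem.List.pySetD_natCast, PySem.List.pyGetD_natCast]
      constructor
      · split_ifs <;> simp [hsc]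
      · intro m hm
        rw [pvStep2 sc j i m _ _ (by omega) (by omega) (by omega) (by omega)]
        simp only [Nat.cast_inj]

theorem pvScoreFold (bal : List Int) (n : Nat) (L : List ((Int × Int) × (Int × Int)))
    (hL : ∀ t ∈ L, ∃ i j : Nat, t.1 = ((i : Int), (j : Int)) ∧ i ≤ j ∧ j < n) :
    ∀ sc : List Int, sc.length = n →
    ((L.foldl (fun sc t =>
        if t.1.1 = t.1.2 ∨ t.2.1 = t.2.2 then sc
        else
          let w := if t.2.1 > t.2.2 then t.1.1 else t.1.2
          let l := if t.2.1 > t.2.2 then t.1.2 else t.1.1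
          let sc := if PySem.List.pyGetD bal w 0 ≤ PySem.List.pyGetD bal l 0
                    then PySem.List.pySetD sc w (PySem.List.pyGetD sc w 0 + 1) else sc
          if PySem.List.pyGetD bal l 0 > PySem.List.pyGetD bal w 0
          then PySem.List.pySetD sc l (PySem.List.pyGetD sc l 0 - 1) else sc) sc).length = n
      ∧ ∀ m, m < n → (L.foldl (fun sc t =>
        if t.1.1 = t.1.2 ∨ t.2.1 = t.2.2 then sc
        else
          let w := if t.2.1 > t.2.2 then t.1.1 else t.1.2
          let l := if t.2.1 > t.2.2 then t.1.2 else t.1.1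
          let sc := if PySem.List.pyGetD bal w 0 ≤ PySem.List.pyGetD bal l 0
                    then PySem.List.pySetD sc w (PySem.List.pyGetD sc w 0 + 1) else sc
          if PySem.List.pyGetD bal l 0 > PySem.List.pyGetD bal w 0
          then PySem.List.pySetD sc l (PySem.List.pyGetD sc l 0 - 1) else sc) sc).getD m 0
          = sc.getD m 0 + (L.map (fun t => pvDelta bal t m)).sum) := by
  induction L with
  | nil => intro sc hsc; exact ⟨hsc, fun m _ => by simp⟩
  | cons t L ih =>
    intro sc hsc
    obtain ⟨i, j, ht1, hij, hj⟩ := hL t List.mem_cons_self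
    have hstep := pvStep_one bal n sc hsc t i j ht1 hij hj
    simp only [List.foldl_cons]
    obtain ⟨ihlen, ihget⟩ := ih (fun t' ht' => hL t' (List.mem_cons_of_mem _ ht')) _ hstep.1
    refine ⟨ihlen, fun m hm => ?_⟩
    rw [ihget m hm, hstep.2 m hm, List.map_cons, List.sum_cons]
    ring

theorem pvDelta_eq_pvFi (n : Nat) (M : List (List Int))
    (pc : PySem.Dict (Int × Int) (Int × Int)) (bal : List Int)
    (h3 : ∀ i j : Nat, i < j → j < n →
      pc.getD ((i : Int), (j : Int)) (0, 0) = ((M.getD i []).getD j 0, (M.getD j []).getD i 0))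
    (h6 : pc.keys.Nodup)
    (h7 : ∀ p ∈ pc.keys, ∃ i j : Nat, p = ((i : Int), (j : Int)) ∧ i ≤ j ∧ j < n)
    (m : Nat) (t : (Int × Int) × (Int × Int)) (ht : t ∈ pc.items) :
    pvDelta bal t m = pvFi M bal m t.1 := by
  obtain ⟨k, a, b⟩ := t
  have hkey : k ∈ pc.keys := by
    have : k ∈ pc.items.map (fun p => p.1) := List.mem_map_of_mem ht
    simpa [PySem.Dict.keys] using this
  obtain ⟨i, j, rfl, hij, hj⟩ := h7 k hkey
  have hg : pc.get? ((i : Int), (j : Int)) = some (a, b) := by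
    exact PySem.Dict.get?_of_mem_items _ ht h6
  have hval : pc.getD ((i : Int), (j : Int)) (0, 0) = (a, b) := by
    rw [PySem.Dict.getD_eq_get?_getD, hg]
    rfl
  by_cases hijn : i = j
  · subst hijn
    simp [pvDelta, pvFi]
  · have hijlt : i < j := by omega
    have h33 := h3 i j hijlt hj
    rw [hval] at h33
    have ha' : a = (M.getD i []).getD j 0 := congrArg Prod.fst h33
    have hb' : b = (M.getD j []).getD i 0 := congrArg Prod.snd h33
    have hijc : ¬((i : Int) = (j : Int)) := by exact_mod_cast hijn
    simp only [pvDelta, pvFi, Int.toNat_natCast]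
    rw [if_neg hijc]
    by_cases hab : a = b
    · rw [if_pos (Or.inr hab)]
      by_cases hmi : m = i
      · subst hmi
        rw [if_pos rfl]
        unfold pvDiff pvPt pvDflt
        rw [← ha', ← hb', hab]
        split_ifs <;> omega
      · rw [if_neg (show ¬((m : Int) = (i : Int)) by exact_mod_cast hmi)]
        by_cases hmj : m = j
        · subst hmj
          rw [if_pos rfl]
          unfold pvDiff pvPt pvDflt
          rw [← ha', ← hb', hab]
          split_ifs <;> omega
        · rw [if_neg (show ¬((m : Int) = (j : Int)) by exact_mod_cast hmj)]
    · rw [if_neg (by rintro (h | h); exacts [hijc h, hab h])]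
      by_cases hord : a > b
      · simp only [if_pos hord, PySem.List.pyGetD_natCast]
        by_cases hmi : m = i
        · subst hmi
          rw [if_pos rfl]
          unfold pvDiff pvPt pvDflt
          rw [← ha', ← hb']
          split_ifs <;> omega
        · rw [if_neg (show ¬((m : Int) = (i : Int)) by exact_mod_cast hmi)]
          by_cases hmj : m = j
          · subst hmj
            rw [if_pos rfl]
            unfold pvDiff pvPt pvDflt
            rw [← ha', ← hb']
            split_ifs <;> omega
          · rw [if_neg (show ¬((m : Int) = (j : Int)) by exact_mod_cast hmj)]
            split_ifs <;> omega
      · simp only [if_neg hord, PySem.List.pyGetD_natCast]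
        by_cases hmi : m = i
        · subst hmi
          rw [if_pos rfl]
          unfold pvDiff pvPt pvDflt
          rw [← ha', ← hb']
          split_ifs <;> omega
        · rw [if_neg (show ¬((m : Int) = (i : Int)) by exact_mod_cast hmi)]
          by_cases hmj : m = j
          · subst hmj
            rw [if_pos rfl]
            unfold pvDiff pvPt pvDflt
            rw [← ha', ← hb']
            split_ifs <;> omega
          · rw [if_neg (show ¬((m : Int) = (j : Int)) by exact_mod_cast hmj)]
            split_ifs <;> omega

def pvU (n : Nat) : List (Int × Int) :=
  (List.range' 0 n).flatMap (fun (i : Nat) => (List.range' i (n - i)).map (fun (j : Nat) => ((i : Int), (j : Int))))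

theorem pvMem_pvU (n : Nat) (k : Int × Int) :
    k ∈ pvU n ↔ ∃ i j : Nat, k = ((i : Int), (j : Int)) ∧ i ≤ j ∧ j < n := by
  unfold pvU
  constructor
  · intro hk
    rcases List.mem_flatMap.1 hk with ⟨i, hi, hk2⟩
    rcases List.mem_map.1 hk2 with ⟨j, hj, rfl⟩
    rw [List.mem_range'_1] at hi hj
    exact ⟨i, j, rfl, by omega, by omega⟩
  · rintro ⟨i, j, rfl, hij, hj⟩
    exact List.mem_flatMap.2 ⟨i, List.mem_range'_1.2 ⟨by omega, by omega⟩,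
      List.mem_map.2 ⟨j, List.mem_range'_1.2 ⟨by omega, by omega⟩, rfl⟩⟩

theorem pvNodup_flatMap {α β : Type} (l : List α) (f : α → List β)
    (h1 : ∀ a ∈ l, (f a).Nodup)
    (h2 : ∀ a ∈ l, ∀ b ∈ l, a ≠ b → ∀ x ∈ f a, x ∉ f b) (hl : l.Nodup) :
    (l.flatMap f).Nodup := by
  induction l with
  | nil => simp
  | cons a t ih =>
    rw [List.flatMap_cons]
    apply List.Nodup.append
    · exact h1 a List.mem_cons_self
    · exact ih (fun b hb => h1 b (List.mem_cons_of_mem _ hb))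
        (fun b hb c hc hbc => h2 b (List.mem_cons_of_mem _ hb) c (List.mem_cons_of_mem _ hc) hbc)
        (List.nodup_cons.1 hl).2
    · intro x hx hx'
      rcases List.mem_flatMap.1 hx' with ⟨b, hb, hxb⟩
      have hab : a ≠ b := by
        rintro rfl; exact (List.nodup_cons.1 hl).1 hb
      exact h2 a List.mem_cons_self b (List.mem_cons_of_mem _ hb) hab x hx hxb

theorem pvU_nodup (n : Nat) : (pvU n).Nodup := by
  unfold pvU
  apply pvNodup_flatMap
  · intro a _
    apply List.Nodup.map
    · intro x y hxy
      have := congrArg Prod.snd hxy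
      simpa using this
    · exact List.nodup_range'
  · intro a _ b _ hab x hx hx'
    rcases List.mem_map.1 hx with ⟨j, _, rfl⟩
    rcases List.mem_map.1 hx' with ⟨j', _, he⟩
    have := congrArg Prod.fst he
    simp at this
    exact hab this.symm
  · exact List.nodup_range'

theorem pvSum_sublist (K U : List (Int × Int)) (f : Int × Int → Int) (hK : K.Nodup) (hU : U.Nodup)
    (hsub : ∀ k ∈ K, k ∈ U) (hz : ∀ k ∈ U, k ∉ K → f k = 0) :
    (K.map f).sum = (U.map f).sum := by
  rw [← List.sum_toFinset f hK, ← List.sum_toFinset f hU]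
  apply Finset.sum_subset
  · intro x hx
    rw [List.mem_toFinset] at *
    exact hsub x hx
  · intro x hx hnx
    exact hz x (by simpa using hx) (by simpa using hnx)

theorem pvSum_flatMap {α β : Type} (l : List α) (f : α → List β) (g : β → Int) :
    ((l.flatMap f).map g).sum = (l.map (fun a => ((f a).map g).sum)).sum := by
  induction l with
  | nil => simp
  | cons a t ih => simp [List.flatMap_cons, ih]

theorem pvSum_pvU (n : Nat) (M : List (List Int)) (bal : List Int) (m : Nat) (hm : m < n) :
    ((pvU n).map (pvFi M bal m)).sum = ((List.range' 0 n).map (fun j => pvDiff M bal m j)).sum := by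
  rw [pvU, pvSum_flatMap]
  simp only [List.map_map, Function.comp_def]
  have hF : ∀ i j : Nat, pvFi M bal m ((i : Int), (j : Int))
      = if i = j then 0 else if m = i then pvDiff M bal m j
        else if m = j then pvDiff M bal m i else 0 := by
    intro i j
    simp only [pvFi, Int.toNat_natCast]
    by_cases h1 : i = j
    · subst h1; simp
    · rw [if_neg (show ¬((i : Int) = (j : Int)) by exact_mod_cast h1), if_neg h1]
      by_cases h2 : m = i
      · subst h2; simp
      · rw [if_neg (show ¬((m : Int) = (i : Int)) by exact_mod_cast h2), if_neg h2]
        by_cases h3 : m = j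
        · subst h3; simp
        · rw [if_neg (show ¬((m : Int) = (j : Int)) by exact_mod_cast h3), if_neg h3]
  have hinner_m : ((List.range' m (n - m)).map (fun (j : Nat) => pvFi M bal m ((m : Int), (j : Int)))).sum
      = ((List.range' (m + 1) (n - m - 1)).map (fun j => pvDiff M bal m j)).sum := by
    have h1 : n - m = (n - m - 1) + 1 := by omega
    rw [h1, List.range'_succ, List.map_cons, List.sum_cons, hF m m, if_pos rfl]
    have hc : ∀ j ∈ List.range' (m + 1) (n - m - 1),
        pvFi M bal m ((m : Int), (j : Int)) = pvDiff M bal m j := by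
      intro j hj
      have := List.mem_range'_1.1 hj
      rw [hF m j, if_neg (by omega), if_pos rfl]
    rw [List.map_congr_left hc]
    simp
  have hinner_ne : ∀ i : Nat, i ≠ m →
      ((List.range' i (n - i)).map (fun (j : Nat) => pvFi M bal m ((i : Int), (j : Int)))).sum
        = if i ≤ m then pvDiff M bal m i else 0 := by
    intro i hi
    have hc : ∀ j ∈ List.range' i (n - i),
        pvFi M bal m ((i : Int), (j : Int)) = if j = m then pvDiff M bal m i else 0 := by
      intro j hj
      have hjr := List.mem_range'_1.1 hj
      rw [hF i j]
      by_cases hjm' : j = m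
      · subst hjm'
        rw [if_neg (by omega), if_neg (by omega), if_pos rfl]
      · by_cases hij : i = j
        · rw [if_pos hij, if_neg hjm']
        · rw [if_neg hij, if_neg (by omega), if_neg (by omega), if_neg hjm']
    rw [List.map_congr_left hc, pvSum_ind' (n - i) i m _]
    split_ifs <;> first | rfl | omega
  rw [pvRange'_split n m hm]
  simp only [List.map_append, List.sum_append, List.map_cons, List.sum_cons]
  rw [hinner_m]
  have hp1 : ∀ i ∈ List.range' 0 m,
      ((List.range' i (n - i)).map (fun (j : Nat) => pvFi M bal m ((i : Int), (j : Int)))).sum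
        = pvDiff M bal m i := by
    intro i hi
    have := List.mem_range'_1.1 hi
    rw [hinner_ne i (by omega), if_pos (by omega)]
  have hp3 : ∀ i ∈ List.range' (m + 1) (n - m - 1),
      ((List.range' i (n - i)).map (fun (j : Nat) => pvFi M bal m ((i : Int), (j : Int)))).sum
        = (0 : Int) := by
    intro i hi
    have := List.mem_range'_1.1 hi
    rw [hinner_ne i (by omega), if_neg (by omega)]
  rw [List.map_congr_left hp1, List.map_congr_left hp3]
  have hds : pvDiff M bal m m = 0 := by
    simp [pvDiff, pvPt, pvDflt]
  rw [hds]
  simp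

theorem pvSum_count (l : List Int) (v : Int) :
    (l.map (fun x => if v > x then (1 : Int) else 0)).sum = (l.countP (fun x => decide (x < v)) : Int) := by
  induction l with
  | nil => simp
  | cons x t ih =>
    rw [List.map_cons, List.sum_cons, List.countP_cons, ih]
    by_cases h : x < v
    · rw [if_pos h, if_pos (by simpa using h)]; push_cast; ring
    · rw [if_neg h, if_neg (by simpa using h)]; push_cast; ring

-- rank of a value in a sorted list = number of smaller elements
theorem pvLess_keep (L : List (Int × Int)) (d : PySem.Dict Int Int) (v w : Int)
    (h : d.get? v = some w) :
    (L.foldl (fun d p => if d.contains p.2 then d else d.insert p.2 p.1) d).get? v = some w := by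
  induction L generalizing d with
  | nil => exact h
  | cons p t ih =>
    rw [List.foldl_cons]
    apply ih
    by_cases hc : d.contains p.2
    · simp [hc, h]
    · rw [if_neg hc]
      by_cases hv : v = p.2
      · subst hv
        rw [PySem.Dict.contains_eq_isSome_get?, h] at hc
        simp at hc
      · rw [PySem.Dict.get?_insert_of_ne _ _ hv]
        exact h

theorem pvLess_get (l : List Int) : ∀ (s : Int) (d : PySem.Dict Int Int) (v : Int), v ∈ l →
    d.contains v = false →
    ((PySem.List.enumerate l s).foldl (fun d p => if d.contains p.2 then d else d.insert p.2 p.1) d).get? v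
      = some (s + (l.idxOf v : Int)) := by
  induction l with
  | nil => intro s d v hv; exact absurd hv (by simp)
  | cons x t ih =>
    intro s d v hv hd
    rw [PySem.List.enumerate_cons, List.foldl_cons]
    by_cases hvx : v = x
    · subst hvx
      rw [if_neg (by simp [hd]), List.idxOf_cons_self]
      have : (d.insert v s).get? v = some s := PySem.Dict.get?_insert_self _ _ _
      have := pvLess_keep (PySem.List.enumerate t (s + 1)) _ v s this
      simpa using this
    · have hvt : v ∈ t := by
        rcases List.mem_cons.1 hv with h' | h'
        · exact absurd h' hvx
        · exact h'
      have hstep : ∀ d' : PySem.Dict Int Int, d'.contains v = false →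
          (((PySem.List.enumerate t (s + 1)).foldl
            (fun d p => if d.contains p.2 then d else d.insert p.2 p.1) d')).get? v
            = some ((s + 1) + (t.idxOf v : Int)) := fun d' hd' => ih (s + 1) d' v hvt hd'
      have hgoal : (if d.contains x then d else d.insert x s).contains v = false := by
        by_cases hc : d.contains x
        · rw [if_pos hc]; exact hd
        · rw [if_neg hc, PySem.Dict.contains_insert]
          simp [hd, hvx]
      rw [hstep _ hgoal, List.idxOf_cons_ne _ (by exact fun h => hvx h.symm)]
      congr 1
      push_cast
      ring

theorem pvIdxOf_sorted (l : List Int) (hl : l.Pairwise (· ≤ ·)) (v : Int) (hv : v ∈ l) :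
    ((l.idxOf v : Nat) : Int) = (l.countP (fun x => decide (x < v)) : Int) := by
  induction l with
  | nil => exact absurd hv (by simp)
  | cons x t ih =>
    rw [List.pairwise_cons] at hl
    by_cases hvx : v = x
    · subst hvx
      rw [List.idxOf_cons_self, List.countP_cons]
      have h0 : t.countP (fun x => decide (x < v)) = 0 := by
        rw [List.countP_eq_zero]
        intro y hy
        simp only [decide_eq_true_eq]
        exact not_lt.2 (hl.1 y hy)
      rw [h0]
      simp
    · have hvt : v ∈ t := by
        rcases List.mem_cons.1 hv with h' | h'
        · exact absurd h' hvx
        · exact h'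
      rw [List.idxOf_cons_ne _ (by exact fun h => hvx h.symm), List.countP_cons]
      have hxv : x < v := lt_of_le_of_ne (hl.1 v hvt) (by exact fun h => hvx h.symm)
      rw [if_pos (by simpa using hxv)]
      push_cast
      rw [ih hl.2 hvt]

theorem pvMap_getD_range (l : List Int) :
    (List.range' 0 l.length).map (fun j => l.getD j 0) = l := by
  apply List.ext_getElem
  · simp
  · intro k h1 h2
    simp only [List.getElem_map, List.getElem_range']
    rw [List.getD_eq_getElem _ _ (by simpa using h2)]
    congr 1
    omega

theorem pvRank (bal : List Int) (m : Nat) (hm : m < bal.length) :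
    ((PySem.List.enumerate (PySem.List.sorted bal (fun x => x) false) 0).foldl
        (fun d p => if d.contains p.2 then d else d.insert p.2 p.1) PySem.Dict.empty).getD (bal.getD m 0) 0
      = ((List.range' 0 bal.length).map (fun j => pvDflt bal m j)).sum := by
  set v := bal.getD m 0 with hv
  have hvbal : v ∈ bal := by
    rw [hv, List.getD_eq_getElem _ _ hm]
    exact List.getElem_mem hm
  have hperm : (PySem.List.sorted bal (fun x => x) false).Perm bal := PySem.List.sorted_perm _ _ _
  have hvs : v ∈ PySem.List.sorted bal (fun x => x) false := hperm.mem_iff.2 hvbal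
  have hpw : (PySem.List.sorted bal (fun x => x) false).Pairwise (· ≤ ·) := by
    have := PySem.List.sorted_pairwise bal (fun x => x)
    simpa using this
  have hget := pvLess_get (PySem.List.sorted bal (fun x => x) false) 0 PySem.Dict.empty v hvs
    (PySem.Dict.contains_empty _)
  rw [PySem.Dict.getD_eq_get?_getD, hget]
  have hidx := pvIdxOf_sorted (PySem.List.sorted bal (fun x => x) false) hpw v hvs
  have hcnt : ((PySem.List.sorted bal (fun x => x) false).countP (fun x => decide (x < v)) : Int)
      = (bal.countP (fun x => decide (x < v)) : Int) := by
    rw [hperm.countP_eq]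
  have hmap : (List.range' 0 bal.length).map (fun j => pvDflt bal m j)
      = bal.map (fun x => if v > x then (1 : Int) else 0) := by
    unfold pvDflt
    conv_rhs => rw [← pvMap_getD_range bal]
    rw [List.map_map]
    rfl
  rw [hmap, pvSum_count]
  simp only [Option.getD_some, zero_add]
  rw [hidx, hcnt]

theorem pvGetD_map_range' (f : Nat → Int) (n i : Nat) (hi : i < n) :
    ((List.range' 0 n).map f).getD i 0 = f i := by
  rw [← List.range_eq_range']
  exact PySem.List.getD_map_range f n i 0 hi

theorem pvTail (n : Nat) (M : List (List Int)) (pc : PySem.Dict (Int × Int) (Int × Int)) (bal : List Int)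
    (h : pvInv n M pc bal) :
    (PySem.List.max? ((PySem.List.pyRange 0 (n:Int) 1).map (fun i =>
      (PySem.List.pyRange 0 (n:Int) 1).foldl (fun acc j =>
        let acc := if PySem.List.pyGetD (PySem.List.pyGetD M i []) j 0 > PySem.List.pyGetD (PySem.List.pyGetD M j []) i 0 then acc + 1 else acc
        if PySem.List.pyGetD (PySem.List.pyGetD M i []) j 0 = PySem.List.pyGetD (PySem.List.pyGetD M j []) i 0 then
          (if PySem.List.pyGetD ((PySem.List.pyRange 0 (n:Int) 1).map (fun i =>
                ((PySem.List.pyRange 0 (n:Int) 1).map (fun x => PySem.List.pyGetD (PySem.List.pyGetD M i []) x 0)).sum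
                - ((PySem.List.pyRange 0 (n:Int) 1).map (fun x => PySem.List.pyGetD (PySem.List.pyGetD M x []) i 0)).sum)) i 0
              > PySem.List.pyGetD ((PySem.List.pyRange 0 (n:Int) 1).map (fun i =>
                ((PySem.List.pyRange 0 (n:Int) 1).map (fun x => PySem.List.pyGetD (PySem.List.pyGetD M i []) x 0)).sum
                - ((PySem.List.pyRange 0 (n:Int) 1).map (fun x => PySem.List.pyGetD (PySem.List.pyGetD M x []) i 0)).sum)) j 0
           then acc + 1 else acc)
        else acc) (0 : Int))) (fun y => y)).getD 0
    = (PySem.List.max? ((pc.items.foldl (fun sc t =>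
        if t.1.1 = t.1.2 ∨ t.2.1 = t.2.2 then sc
        else
          let w := if t.2.1 > t.2.2 then t.1.1 else t.1.2
          let l := if t.2.1 > t.2.2 then t.1.2 else t.1.1
          let sc := if PySem.List.pyGetD bal w 0 ≤ PySem.List.pyGetD bal l 0
                    then PySem.List.pySetD sc w (PySem.List.pyGetD sc w 0 + 1) else sc
          if PySem.List.pyGetD bal l 0 > PySem.List.pyGetD bal w 0
          then PySem.List.pySetD sc l (PySem.List.pyGetD sc l 0 - 1) else sc)
        (bal.map (fun v =>
          ((PySem.List.enumerate (PySem.List.sorted bal (fun x => x) false) 0).foldl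
            (fun d p => if d.contains p.2 then d else d.insert p.2 p.1) PySem.Dict.empty).getD v 0)))) (fun y => y)).getD 0 := by
  obtain ⟨h1, h2, h3, h6, h7, h4, h5⟩ := h
  simp only [PySem.List.pyRange_zero_natCast, List.foldl_map, List.map_map,
    Function.comp_def, PySem.List.pyGetD_natCast, List.range_eq_range']
  have hGIget : ∀ i : Nat, i < n →
      ((List.range' 0 n).map (fun x : Nat =>
        ((List.range' 0 n).map (fun y => (M.getD x []).getD y 0)).sum -
        ((List.range' 0 n).map (fun y => (M.getD y []).getD x 0)).sum)).getD i 0 = bal.getD i 0 := by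
    intro i hi
    rw [pvGetD_map_range' _ n i hi]
    exact (h5 i hi).symm
  have hA : ∀ i : Nat, i < n → ∀ init : Int,
      (List.range' 0 n).foldl (fun acc j =>
        if (M.getD i []).getD j 0 = (M.getD j []).getD i 0 then
          if ((List.range' 0 n).map (fun x : Nat =>
                ((List.range' 0 n).map (fun y => (M.getD x []).getD y 0)).sum -
                ((List.range' 0 n).map (fun y => (M.getD y []).getD x 0)).sum)).getD i 0 >
             ((List.range' 0 n).map (fun x : Nat =>
                ((List.range' 0 n).map (fun y => (M.getD x []).getD y 0)).sum -
                ((List.range' 0 n).map (fun y => (M.getD y []).getD x 0)).sum)).getD j 0 then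
            (if (M.getD i []).getD j 0 > (M.getD j []).getD i 0 then acc + 1 else acc) + 1
          else if (M.getD i []).getD j 0 > (M.getD j []).getD i 0 then acc + 1 else acc
        else if (M.getD i []).getD j 0 > (M.getD j []).getD i 0 then acc + 1 else acc) init
      = init + ((List.range' 0 n).map (fun j => pvPt M bal i j)).sum := by
    intro i hi init
    rw [PySem.List.foldl_congr_mem _ _ (fun acc j => acc + pvPt M bal i j) init (by
      intro acc j hj
      have hj' : j < n := by have := List.mem_range'_1.1 hj; omega
      rw [hGIget i hi, hGIget j hj']
      simp only [pvPt]
      split_ifs <;> omega)]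
    exact PySem.List.foldl_add _ _ _
  have hAmap : (List.range' 0 n).map (fun i : Nat =>
      (List.range' 0 n).foldl (fun acc j =>
        if (M.getD i []).getD j 0 = (M.getD j []).getD i 0 then
          if ((List.range' 0 n).map (fun x : Nat =>
                ((List.range' 0 n).map (fun y => (M.getD x []).getD y 0)).sum -
                ((List.range' 0 n).map (fun y => (M.getD y []).getD x 0)).sum)).getD i 0 >
             ((List.range' 0 n).map (fun x : Nat =>
                ((List.range' 0 n).map (fun y => (M.getD x []).getD y 0)).sum -
                ((List.range' 0 n).map (fun y => (M.getD y []).getD x 0)).sum)).getD j 0 then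
            (if (M.getD i []).getD j 0 > (M.getD j []).getD i 0 then acc + 1 else acc) + 1
          else if (M.getD i []).getD j 0 > (M.getD j []).getD i 0 then acc + 1 else acc
        else if (M.getD i []).getD j 0 > (M.getD j []).getD i 0 then acc + 1 else acc) (0:Int))
      = (List.range' 0 n).map (fun i =>
        (0:Int) + ((List.range' 0 n).map (fun j => pvPt M bal i j)).sum) := by
    apply List.map_congr_left
    intro i hi
    exact hA i (by have := List.mem_range'_1.1 hi; omega) 0
  rw [hAmap]
  -- B side
  have hsc0len : (bal.map (fun v =>
      ((PySem.List.enumerate (PySem.List.sorted bal (fun x => x) false) 0).foldl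
        (fun d p => if d.contains p.2 then d else d.insert p.2 p.1) PySem.Dict.empty).getD v 0)).length = n := by
    simp [h4]
  have hL : ∀ t ∈ pc.items, ∃ i j : Nat, t.1 = ((i : Int), (j : Int)) ∧ i ≤ j ∧ j < n := by
    intro t ht
    apply h7
    have : t.1 ∈ pc.items.map (fun p => p.1) := List.mem_map_of_mem ht
    simpa [PySem.Dict.keys] using this
  obtain ⟨hflen, hfget⟩ := pvScoreFold bal n pc.items hL _ hsc0len
  have hkeysub : ∀ k ∈ pc.keys, k ∈ pvU n := by
    intro k hk
    obtain ⟨i, j, rfl, hij, hj⟩ := h7 k hk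
    exact (pvMem_pvU n _).2 ⟨i, j, rfl, hij, hj⟩
  have hzero : ∀ m : Nat, ∀ k ∈ pvU n, k ∉ pc.keys → pvFi M bal m k = 0 := by
    intro m k hkU hknot
    obtain ⟨i, j, rfl, hij, hj⟩ := (pvMem_pvU n k).1 hkU
    by_cases hijn : i = j
    · subst hijn
      simp [pvFi]
    · have hcf : pc.contains ((i : Int), (j : Int)) = false := by
        rw [← Bool.not_eq_true]
        intro hc
        exact hknot ((PySem.Dict.contains_iff_mem_keys _ _).1 hc)
      have hgd : pc.getD ((i : Int), (j : Int)) ((0 : Int), (0 : Int)) = (0, 0) := by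
        exact PySem.Dict.getD_of_not_contains _ _ hcf
      have h33 := h3 i j (by omega) hj
      rw [hgd] at h33
      have hc1 : (M.getD i []).getD j 0 = 0 := (congrArg Prod.fst h33).symm
      have hc2 : (M.getD j []).getD i 0 = 0 := (congrArg Prod.snd h33).symm
      simp only [pvFi, Int.toNat_natCast]
      rw [if_neg (show ¬((i : Int) = (j : Int)) by exact_mod_cast hijn)]
      by_cases hmi : m = i
      · subst hmi
        rw [if_pos rfl]
        unfold pvDiff pvPt pvDflt
        rw [hc1, hc2]
        split_ifs <;> omega
      · rw [if_neg (show ¬((m : Int) = (i : Int)) by exact_mod_cast hmi)]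
        by_cases hmj : m = j
        · subst hmj
          rw [if_pos rfl]
          unfold pvDiff pvPt pvDflt
          rw [hc1, hc2]
          split_ifs <;> omega
        · rw [if_neg (show ¬((m : Int) = (j : Int)) by exact_mod_cast hmj)]
  have hdelta : ∀ m : Nat, m < n → (pc.items.map (fun t => pvDelta bal t m)).sum
      = ((List.range' 0 n).map (fun j => pvDiff M bal m j)).sum := by
    intro m hm
    rw [List.map_congr_left (fun t ht => pvDelta_eq_pvFi n M pc bal h3 h6 h7 m t ht)]
    have hmm : pc.items.map (fun t => pvFi M bal m t.1) = pc.keys.map (pvFi M bal m) := by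
      simp [PySem.Dict.keys, List.map_map, Function.comp_def]
    rw [hmm, pvSum_sublist pc.keys (pvU n) _ h6 (pvU_nodup n) hkeysub (hzero m),
        pvSum_pvU n M bal m hm]
  have hrank : ∀ m : Nat, m < n → (bal.map (fun v =>
      ((PySem.List.enumerate (PySem.List.sorted bal (fun x => x) false) 0).foldl
        (fun d p => if d.contains p.2 then d else d.insert p.2 p.1) PySem.Dict.empty).getD v 0)).getD m 0
      = ((List.range' 0 n).map (fun j => pvDflt bal m j)).sum := by
    intro m hm
    have hmb : m < bal.length := by omega
    rw [List.getD_eq_getElem _ _ (by simpa using hmb), List.getElem_map]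
    rw [show bal[m] = bal.getD m 0 from (List.getD_eq_getElem _ _ hmb).symm]
    rw [pvRank bal m hmb, h4]
  have hfinal : ∀ m : Nat, m < n →
      (pc.items.foldl (fun sc t =>
        if t.1.1 = t.1.2 ∨ t.2.1 = t.2.2 then sc
        else
          let w := if t.2.1 > t.2.2 then t.1.1 else t.1.2
          let l := if t.2.1 > t.2.2 then t.1.2 else t.1.1
          let sc := if PySem.List.pyGetD bal w 0 ≤ PySem.List.pyGetD bal l 0
                    then PySem.List.pySetD sc w (PySem.List.pyGetD sc w 0 + 1) else sc
          if PySem.List.pyGetD bal l 0 > PySem.List.pyGetD bal w 0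
          then PySem.List.pySetD sc l (PySem.List.pyGetD sc l 0 - 1) else sc)
        (bal.map (fun v =>
          ((PySem.List.enumerate (PySem.List.sorted bal (fun x => x) false) 0).foldl
            (fun d p => if d.contains p.2 then d else d.insert p.2 p.1) PySem.Dict.empty).getD v 0))).getD m 0
      = 0 + ((List.range' 0 n).map (fun j => pvPt M bal m j)).sum := by
    intro m hm
    rw [hfget m hm, hrank m hm, hdelta m hm]
    have hsp : ((List.range' 0 n).map (fun j => pvPt M bal m j)).sum
        = ((List.range' 0 n).map (fun j => pvDflt bal m j)).sum
          + ((List.range' 0 n).map (fun j => pvDiff M bal m j)).sum := by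
      rw [List.map_congr_left (fun j _ =>
        show pvPt M bal m j = pvDflt bal m j + pvDiff M bal m j from by unfold pvDiff; ring)]
      simp [List.sum_map_add]
    rw [hsp]
    ring
  have hlist : (List.range' 0 n).map (fun i =>
        (0:Int) + ((List.range' 0 n).map (fun j => pvPt M bal i j)).sum)
      = pc.items.foldl (fun sc t =>
        if t.1.1 = t.1.2 ∨ t.2.1 = t.2.2 then sc
        else
          let w := if t.2.1 > t.2.2 then t.1.1 else t.1.2
          let l := if t.2.1 > t.2.2 then t.1.2 else t.1.1
          let sc := if PySem.List.pyGetD bal w 0 ≤ PySem.List.pyGetD bal l 0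
                    then PySem.List.pySetD sc w (PySem.List.pyGetD sc w 0 + 1) else sc
          if PySem.List.pyGetD bal l 0 > PySem.List.pyGetD bal w 0
          then PySem.List.pySetD sc l (PySem.List.pyGetD sc l 0 - 1) else sc)
        (bal.map (fun v =>
          ((PySem.List.enumerate (PySem.List.sorted bal (fun x => x) false) 0).foldl
            (fun d p => if d.contains p.2 then d else d.insert p.2 p.1) PySem.Dict.empty).getD v 0)) := by
    apply List.ext_getElem
    · simp [hflen]
    · intro m hm1 hm2
      have hmn : m < n := by simpa using hm1
      rw [List.getElem_map, List.getElem_range']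
      simp only [one_mul, Nat.zero_add]
      have hthis := hfinal m hmn
      rw [List.getD_eq_getElem _ _ (by rw [hflen]; exact hmn)] at hthis
      exact hthis.symm
  rw [hlist]

theorem pv_main (friends gifts : List String) : solution friends gifts = solution_alt friends gifts := by
  simp only [solution, solution_alt]
  exact pvTail friends.length _ _ _
    (pvInv_fold friends gifts _ _ _ (pvInv_init friends.length))

-- ===== VERDICT (by name: the statement is the Claim_ definition above) =====
theorem solution_spec : Claim_equal_solution := by
  intro friends gifts _ _
  exact pv_main friends gifts
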